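-- pv_equiv track=rewrite | github.com/Lukasz1928/advent-of-code | solutions/2017/day11/task2/main.py | reduce_moves
-- ===== SOURCE A (Python) =====
-- def reduce_moves(ms):
--     changed = True
--     reduced = False
--     while changed:
--         changed = False
--         if ms['n'] > 0:
--             if ms['se'] > 0:
--                 m = min(ms['n'], ms['se'])
--                 ms['n'] = ms['n'] - m
--                 ms['se'] = ms['se'] - m
--                 ms['ne'] = ms['ne'] + m
--                 changed = True
--             elif ms['ne'] < 0:
--                 m = min(ms['n'], -ms['ne'])
--                 ms['n'] = ms['n'] - m
--                 ms['ne'] = ms['ne'] + m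
--                 ms['se'] = ms['se'] - m
--                 changed = True
--         if ms['n'] < 0:
--             if ms['ne'] > 0:
--                 m = min(-ms['n'], ms['ne'])
--                 ms['n'] = ms['n'] + m
--                 ms['ne'] = ms['ne'] - m
--                 ms['se'] = ms['se'] + m
--                 changed = True
--             elif ms['se'] < 0:
--                 m = min(-ms['n'], -ms['se'])
--                 ms['n'] = ms['n'] + m
--                 ms['se'] = ms['se'] + m
--                 ms['ne'] = ms['ne'] - m
--                 changed = True
--         if ms['ne'] > 0:
--             if ms['se'] < 0:
--                 m = min(ms['ne'], -ms['se'])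
--                 ms['ne'] = ms['ne'] - m
--                 ms['se'] = ms['se'] + m
--                 ms['n'] = ms['n'] + m
--                 changed = True
--         if ms['ne'] < 0:
--             if ms['se'] > 0:
--                 m = min(-ms['ne'], ms['se'])
--                 ms['ne'] = ms['ne'] + m
--                 ms['se'] = ms['se'] - m
--                 ms['n'] = ms['n'] - m
--                 changed = True
--         if ms['se'] > 0:
--             if ms['ne'] < 0:
--                 m = min(ms['se'], -ms['ne'])
--                 ms['se'] = ms['se'] - m
--                 ms['ne'] = ms['ne'] + m
--                 ms['n'] = ms['n'] - m
--                 changed = True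
--         if ms['se'] < 0:
--             if ms['ne'] > 0:
--                 m = min(-ms['se'], ms['ne'])
--                 ms['se'] = ms['se'] + m
--                 ms['ne'] = ms['ne'] - m
--                 ms['n'] = ms['n'] + m
--                 changed = True
--         if changed:
--             reduced = True
--     return ms, reduced
-- ===== SOURCE B (Python) =====
-- def reduce_moves(ms):
--     n0, ne0, se0 = ms['n'], ms['ne'], ms['se']
--     a = n0 + ne0
--     b = ne0 + se0
--     ne = max(min(a, b), min(max(a, b), 0))  # median of [a, 0, b]
--     ms['n'], ms['ne'], ms['se'] = a - ne, ne, b - ne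
--     return ms, (a - ne, ne, b - ne) != (n0, ne0, se0)
-- ===== Notes on version B (the rewrite author's own statement) =====
-- stated objective: simpler
-- what changed: Replaces A's rewrite-until-fixpoint while loop of six cancellation rules by a closed-form computation: the reduced triple is determined by the two loop invariants a=n+ne and b=ne+se, with the new ne the median of [a,0,b]; the reduced flag compares the closed-form triple with the original one.
import Mathlib
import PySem

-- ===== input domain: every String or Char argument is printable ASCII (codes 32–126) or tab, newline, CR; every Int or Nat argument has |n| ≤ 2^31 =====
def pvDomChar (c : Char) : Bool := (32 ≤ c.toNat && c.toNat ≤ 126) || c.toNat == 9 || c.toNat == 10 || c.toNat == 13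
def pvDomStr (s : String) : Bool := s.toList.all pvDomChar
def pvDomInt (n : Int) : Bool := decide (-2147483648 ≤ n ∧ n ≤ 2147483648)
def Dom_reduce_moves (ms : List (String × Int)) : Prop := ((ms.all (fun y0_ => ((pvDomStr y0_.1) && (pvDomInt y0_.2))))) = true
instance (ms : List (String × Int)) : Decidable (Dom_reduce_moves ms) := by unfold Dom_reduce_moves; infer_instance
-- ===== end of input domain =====

-- B replaces A's repeated rewrite-until-fixpoint loop by a closed-form median computation on the
-- two loop invariants (n+ne, ne+se); both mutate the same dict keys in place (return value proved).

-- ===== PORT A =====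
-- state threaded through the six `if` blocks of one pass of A's while-body: (n, ne, se, changed)
def pvOp1 (q : Int × Int × Int × Bool) : Int × Int × Int × Bool :=
  if q.1 > 0 then
    if q.2.2.1 > 0 then
      let m := min q.1 q.2.2.1; (q.1 - m, q.2.1 + m, q.2.2.1 - m, true)
    else if q.2.1 < 0 then
      let m := min q.1 (-q.2.1); (q.1 - m, q.2.1 + m, q.2.2.1 - m, true)
    else q
  else q

def pvOp2 (q : Int × Int × Int × Bool) : Int × Int × Int × Bool :=
  if q.1 < 0 then
    if q.2.1 > 0 then
      let m := min (-q.1) q.2.1; (q.1 + m, q.2.1 - m, q.2.2.1 + m, true)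
    else if q.2.2.1 < 0 then
      let m := min (-q.1) (-q.2.2.1); (q.1 + m, q.2.1 - m, q.2.2.1 + m, true)
    else q
  else q

def pvOp3 (q : Int × Int × Int × Bool) : Int × Int × Int × Bool :=
  if q.2.1 > 0 then
    if q.2.2.1 < 0 then
      let m := min q.2.1 (-q.2.2.1); (q.1 + m, q.2.1 - m, q.2.2.1 + m, true)
    else q
  else q

def pvOp4 (q : Int × Int × Int × Bool) : Int × Int × Int × Bool :=
  if q.2.1 < 0 then
    if q.2.2.1 > 0 then
      let m := min (-q.2.1) q.2.2.1; (q.1 - m, q.2.1 + m, q.2.2.1 - m, true)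
    else q
  else q

def pvOp5 (q : Int × Int × Int × Bool) : Int × Int × Int × Bool :=
  if q.2.2.1 > 0 then
    if q.2.1 < 0 then
      let m := min q.2.2.1 (-q.2.1); (q.1 - m, q.2.1 + m, q.2.2.1 - m, true)
    else q
  else q

def pvOp6 (q : Int × Int × Int × Bool) : Int × Int × Int × Bool :=
  if q.2.2.1 < 0 then
    if q.2.1 > 0 then
      let m := min (-q.2.2.1) q.2.1; (q.1 + m, q.2.1 - m, q.2.2.1 + m, true)
    else q
  else q

-- one pass of A's while-body, starting with changed = False
def pvStepA (s : Int × Int × Int) : (Int × Int × Int) × Bool :=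
  let q := pvOp6 (pvOp5 (pvOp4 (pvOp3 (pvOp2 (pvOp1 (s.1, s.2.1, s.2.2, false))))))
  ((q.1, q.2.1, q.2.2.1), q.2.2.2)

def pvMu3 (s : Int × Int × Int) : Nat := s.1.natAbs + s.2.1.natAbs + s.2.2.natAbs

-- the while loop, returning (final state, reduced); the Nat fuel only makes the recursion
-- structural (never exhausted: a pass that reports changed strictly decreases pvMu3, see
-- pvStepA_spec below, so pvMu3 s + 1 passes always reach the unchanged pass)
def pvLoopAux : Nat → (Int × Int × Int) → (Int × Int × Int) × Bool
  | 0, s => (s, false)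
  | fuel + 1, s =>
    match pvStepA s with
    | (s', true) => ((pvLoopAux fuel s').1, true)
    | (s', false) => (s', false)

def pvLoopA (s : Int × Int × Int) : (Int × Int × Int) × Bool :=
  pvLoopAux (pvMu3 s + 1) s

def reduce_moves (ms : List (String × Int)) : (List (String × Int)) × Bool :=
  let d := PySem.Dict.mk ms
  let n := d.getD "n" 0
  let ne := d.getD "ne" 0
  let se := d.getD "se" 0
  let r := pvLoopA (n, ne, se)
  ((((d.insert "n" r.1.1).insert "ne" r.1.2.1).insert "se" r.1.2.2).items, r.2)

-- ===== PORT B =====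
def reduce_moves_alt (ms : List (String × Int)) : (List (String × Int)) × Bool :=
  let d := PySem.Dict.mk ms
  let n0 := d.getD "n" 0
  let ne0 := d.getD "ne" 0
  let se0 := d.getD "se" 0
  let a := n0 + ne0
  let b := ne0 + se0
  let ne := max (min a b) (min (max a b) 0)   -- median of [a, 0, b]
  ((((d.insert "n" (a - ne)).insert "ne" ne).insert "se" (b - ne)).items,
   decide ((a - ne, ne, b - ne) ≠ (n0, ne0, se0)))

-- ===== PRECONDITION & SPEC =====
-- Pre_ excludes only the dicts missing one of the keys 'n', 'ne', 'se', on which the Python A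
-- raises KeyError at the first lookup.
def Pre_reduce_moves (ms : List (String × Int)) : Prop :=
  (PySem.Dict.mk ms).contains "n" = true ∧ (PySem.Dict.mk ms).contains "ne" = true ∧
  (PySem.Dict.mk ms).contains "se" = true
instance (ms : List (String × Int)) : Decidable (Pre_reduce_moves ms) := by
  unfold Pre_reduce_moves; infer_instance

def pvWitness_reduce_moves : (List (String × Int)) := [("n", 2), ("ne", -1), ("se", 3)]

def Spec_reduce_moves (ms : List (String × Int)) (out : (List (String × Int)) × Bool) : Prop := out = reduce_moves_alt ms
instance (ms : List (String × Int)) (out : (List (String × Int)) × Bool) : Decidable (Spec_reduce_moves ms out) := by unfold Spec_reduce_moves; infer_instance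

-- ===== CLAIM (what is proved, stated in full; the proofs are below) =====
def Claim_equal_reduce_moves : Prop := ∀ (ms : List (String × Int)), Dom_reduce_moves ms → Pre_reduce_moves ms → Spec_reduce_moves ms (reduce_moves ms)

-- ===== LEMMAS AND PROOFS =====
def pvMu (q : Int × Int × Int × Bool) : Nat := q.1.natAbs + q.2.1.natAbs + q.2.2.1.natAbs

-- each `if` block preserves n+ne and ne+se, never increases the measure, strictly decreases it
-- when it newly sets changed, and leaves the state untouched when changed comes out False
def pvGoodOp (f : Int × Int × Int × Bool → Int × Int × Int × Bool) : Prop :=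
  ∀ q, (f q).1 + (f q).2.1 = q.1 + q.2.1 ∧
       (f q).2.1 + (f q).2.2.1 = q.2.1 + q.2.2.1 ∧
       pvMu (f q) ≤ pvMu q ∧
       ((f q).2.2.2 = true → q.2.2.2 = true ∨ pvMu (f q) < pvMu q) ∧
       ((f q).2.2.2 = false → f q = q)

-- shared measure-decrease lemma for the three blocks of shape (n-m, ne+m, se-m)
theorem pvDec3 {n ne se m : Int} (hm : 0 < m)
    (h1 : m ≤ n ∨ m ≤ -ne) (h2 : m ≤ -ne ∨ m ≤ se) (h3 : m ≤ n ∨ m ≤ se) :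
    (n - m).natAbs + (ne + m).natAbs + (se - m).natAbs <
      n.natAbs + ne.natAbs + se.natAbs := by omega

-- and for the three blocks of shape (n+m, ne-m, se+m)
theorem pvDec3' {n ne se m : Int} (hm : 0 < m)
    (h1 : m ≤ -n ∨ m ≤ ne) (h2 : m ≤ ne ∨ m ≤ -se) (h3 : m ≤ -n ∨ m ≤ -se) :
    (n + m).natAbs + (ne - m).natAbs + (se + m).natAbs <
      n.natAbs + ne.natAbs + se.natAbs := by omega

theorem pvOp1_good : pvGoodOp pvOp1 := by
  intro q
  obtain ⟨n, ne, se, c⟩ := q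
  unfold pvOp1
  dsimp only
  split_ifs with h1 h2 h3
  · have hd := pvDec3 (n := n) (ne := ne) (se := se) (lt_min h1 h2) (Or.inl (min_le_left _ _)) (Or.inr (min_le_right _ _)) (Or.inl (min_le_left _ _))
    exact ⟨by dsimp only; omega, by dsimp only; omega, le_of_lt hd, fun _ => Or.inr hd, fun h => nomatch h⟩
  · have hd := pvDec3 (n := n) (ne := ne) (se := se) (lt_min h1 (by omega)) (Or.inl (min_le_left _ _)) (Or.inl (min_le_right _ _)) (Or.inl (min_le_left _ _))
    exact ⟨by dsimp only; omega, by dsimp only; omega, le_of_lt hd, fun _ => Or.inr hd, fun h => nomatch h⟩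
  · exact ⟨rfl, rfl, le_refl _, fun h => Or.inl h, fun _ => rfl⟩
  · exact ⟨rfl, rfl, le_refl _, fun h => Or.inl h, fun _ => rfl⟩
theorem pvOp2_good : pvGoodOp pvOp2 := by
  intro q
  obtain ⟨n, ne, se, c⟩ := q
  unfold pvOp2
  dsimp only
  split_ifs with h1 h2 h3
  · have hd := pvDec3' (n := n) (ne := ne) (se := se) (lt_min (by omega) h2) (Or.inl (min_le_left _ _)) (Or.inl (min_le_right _ _)) (Or.inl (min_le_left _ _))
    exact ⟨by dsimp only; omega, by dsimp only; omega, le_of_lt hd, fun _ => Or.inr hd, fun h => nomatch h⟩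
  · have hd := pvDec3' (n := n) (ne := ne) (se := se) (lt_min (by omega) (by omega)) (Or.inl (min_le_left _ _)) (Or.inr (min_le_right _ _)) (Or.inr (min_le_right _ _))
    exact ⟨by dsimp only; omega, by dsimp only; omega, le_of_lt hd, fun _ => Or.inr hd, fun h => nomatch h⟩
  · exact ⟨rfl, rfl, le_refl _, fun h => Or.inl h, fun _ => rfl⟩
  · exact ⟨rfl, rfl, le_refl _, fun h => Or.inl h, fun _ => rfl⟩
theorem pvOp3_good : pvGoodOp pvOp3 := by
  intro q
  obtain ⟨n, ne, se, c⟩ := q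
  unfold pvOp3
  dsimp only
  split_ifs with h1 h2
  · have hd := pvDec3' (n := n) (ne := ne) (se := se) (lt_min h1 (by omega)) (Or.inr (min_le_left _ _)) (Or.inl (min_le_left _ _)) (Or.inr (min_le_right _ _))
    exact ⟨by dsimp only; omega, by dsimp only; omega, le_of_lt hd, fun _ => Or.inr hd, fun h => nomatch h⟩
  · exact ⟨rfl, rfl, le_refl _, fun h => Or.inl h, fun _ => rfl⟩
  · exact ⟨rfl, rfl, le_refl _, fun h => Or.inl h, fun _ => rfl⟩
theorem pvOp4_good : pvGoodOp pvOp4 := by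
  intro q
  obtain ⟨n, ne, se, c⟩ := q
  unfold pvOp4
  dsimp only
  split_ifs with h1 h2
  · have hd := pvDec3 (n := n) (ne := ne) (se := se) (lt_min (by omega) h2) (Or.inr (min_le_left _ _)) (Or.inl (min_le_left _ _)) (Or.inr (min_le_right _ _))
    exact ⟨by dsimp only; omega, by dsimp only; omega, le_of_lt hd, fun _ => Or.inr hd, fun h => nomatch h⟩
  · exact ⟨rfl, rfl, le_refl _, fun h => Or.inl h, fun _ => rfl⟩
  · exact ⟨rfl, rfl, le_refl _, fun h => Or.inl h, fun _ => rfl⟩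
theorem pvOp5_good : pvGoodOp pvOp5 := by
  intro q
  obtain ⟨n, ne, se, c⟩ := q
  unfold pvOp5
  dsimp only
  split_ifs with h1 h2
  · have hd := pvDec3 (n := n) (ne := ne) (se := se) (lt_min h1 (by omega)) (Or.inr (min_le_right _ _)) (Or.inl (min_le_right _ _)) (Or.inr (min_le_left _ _))
    exact ⟨by dsimp only; omega, by dsimp only; omega, le_of_lt hd, fun _ => Or.inr hd, fun h => nomatch h⟩
  · exact ⟨rfl, rfl, le_refl _, fun h => Or.inl h, fun _ => rfl⟩
  · exact ⟨rfl, rfl, le_refl _, fun h => Or.inl h, fun _ => rfl⟩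
theorem pvOp6_good : pvGoodOp pvOp6 := by
  intro q
  obtain ⟨n, ne, se, c⟩ := q
  unfold pvOp6
  dsimp only
  split_ifs with h1 h2
  · have hd := pvDec3' (n := n) (ne := ne) (se := se) (lt_min (by omega) h2) (Or.inr (min_le_right _ _)) (Or.inl (min_le_right _ _)) (Or.inr (min_le_left _ _))
    exact ⟨by dsimp only; omega, by dsimp only; omega, le_of_lt hd, fun _ => Or.inr hd, fun h => nomatch h⟩
  · exact ⟨rfl, rfl, le_refl _, fun h => Or.inl h, fun _ => rfl⟩
  · exact ⟨rfl, rfl, le_refl _, fun h => Or.inl h, fun _ => rfl⟩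

theorem pvGoodOp_comp {f g : Int × Int × Int × Bool → Int × Int × Int × Bool}
    (hf : pvGoodOp f) (hg : pvGoodOp g) : pvGoodOp (fun q => g (f q)) := by
  intro q
  dsimp only
  obtain ⟨hf1, hf2, hf3, hf4, hf5⟩ := hf q
  obtain ⟨hg1, hg2, hg3, hg4, hg5⟩ := hg (f q)
  refine ⟨by omega, by omega, by omega, ?_, ?_⟩
  · intro h
    rcases hg4 h with h' | h'
    · rcases hf4 h' with h'' | h'' <;> [left; right] <;> omega
    · right; omega
  · intro h
    have e := hg5 h
    have h2 : (f q).2.2.2 = false := by rw [← e]; exact h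
    rw [e, hf5 h2]

theorem pvStepA_good : pvGoodOp (fun q => pvOp6 (pvOp5 (pvOp4 (pvOp3 (pvOp2 (pvOp1 q)))))) :=
  pvGoodOp_comp (pvGoodOp_comp (pvGoodOp_comp (pvGoodOp_comp (pvGoodOp_comp
    pvOp1_good pvOp2_good) pvOp3_good) pvOp4_good) pvOp5_good) pvOp6_good

theorem pvStepA_spec (s : Int × Int × Int) :
    (pvStepA s).1.1 + (pvStepA s).1.2.1 = s.1 + s.2.1 ∧
    (pvStepA s).1.2.1 + (pvStepA s).1.2.2 = s.2.1 + s.2.2 ∧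
    pvMu3 (pvStepA s).1 ≤ pvMu3 s ∧
    ((pvStepA s).2 = true → pvMu3 (pvStepA s).1 < pvMu3 s) ∧
    ((pvStepA s).2 = false → (pvStepA s).1 = s) := by
  obtain ⟨h1, h2, h3, h4, h5⟩ := pvStepA_good (s.1, s.2.1, s.2.2, false)
  unfold pvStepA
  refine ⟨h1, h2, h3, fun h => ?_, fun h => ?_⟩
  · rcases h4 h with h' | h' <;> simp_all [pvMu, pvMu3]
  · have := h5 h
    simp only [pvMu] at *
    rw [this]

-- B's canonical triple, as a function of the loop state
def pvCanon (s : Int × Int × Int) : Int × Int × Int :=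
  let a := s.1 + s.2.1
  let b := s.2.1 + s.2.2
  let m := max (min a b) (min (max a b) 0)
  (a - m, m, b - m)

theorem pvCanon_congr {s s' : Int × Int × Int}
    (h1 : s'.1 + s'.2.1 = s.1 + s.2.1) (h2 : s'.2.1 + s'.2.2 = s.2.1 + s.2.2) :
    pvCanon s' = pvCanon s := by
  unfold pvCanon; rw [h1, h2]

-- if a block leaves (n,ne,se,false) unchanged, its guard is false
theorem pvOp1_fix {n ne se : Int} (h : pvOp1 (n, ne, se, false) = (n, ne, se, false)) :
    ¬(n > 0 ∧ se > 0) ∧ ¬(n > 0 ∧ ne < 0) := by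
  unfold pvOp1 at h; dsimp only at h; split_ifs at h <;> simp_all

theorem pvOp2_fix {n ne se : Int} (h : pvOp2 (n, ne, se, false) = (n, ne, se, false)) :
    ¬(n < 0 ∧ ne > 0) ∧ ¬(n < 0 ∧ se < 0) := by
  unfold pvOp2 at h; dsimp only at h; split_ifs at h <;> simp_all

theorem pvOp3_fix {n ne se : Int} (h : pvOp3 (n, ne, se, false) = (n, ne, se, false)) :
    ¬(ne > 0 ∧ se < 0) := by
  unfold pvOp3 at h; dsimp only at h; split_ifs at h <;> simp_all

theorem pvOp4_fix {n ne se : Int} (h : pvOp4 (n, ne, se, false) = (n, ne, se, false)) :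
    ¬(ne < 0 ∧ se > 0) := by
  unfold pvOp4 at h; dsimp only at h; split_ifs at h <;> simp_all

-- a state on which one whole pass reports changed = False is already B's canonical triple
theorem pvStepA_fix {s : Int × Int × Int} (h : pvStepA s = (s, false)) : pvCanon s = s := by
  obtain ⟨n, ne, se⟩ := s
  unfold pvStepA at h
  dsimp only at h
  set q0 : Int × Int × Int × Bool := (n, ne, se, false) with hq0
  have hout : pvOp6 (pvOp5 (pvOp4 (pvOp3 (pvOp2 (pvOp1 q0))))) = q0 := by
    have hc : (pvOp6 (pvOp5 (pvOp4 (pvOp3 (pvOp2 (pvOp1 q0)))))).2.2.2 = false := by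
      rw [show (pvOp6 (pvOp5 (pvOp4 (pvOp3 (pvOp2 (pvOp1 q0)))))).2.2.2 = false from by
        have := congrArg Prod.snd h; simpa using this]
    have h6 := (pvOp6_good _).2.2.2.2 hc
    rw [h6] at hc ⊢
    have h5 := (pvOp5_good _).2.2.2.2 hc
    rw [h5] at hc ⊢
    have h4 := (pvOp4_good _).2.2.2.2 hc
    rw [h4] at hc ⊢
    have h3 := (pvOp3_good _).2.2.2.2 hc
    rw [h3] at hc ⊢
    have h2 := (pvOp2_good _).2.2.2.2 hc
    rw [h2] at hc ⊢
    exact (pvOp1_good _).2.2.2.2 hc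
  -- thread fixedness down the chain
  have f1 : pvOp1 q0 = q0 := by
    have hc : (pvOp1 q0).2.2.2 = false := by
      by_contra hcc
      have : (pvOp1 q0).2.2.2 = true := by revert hcc; cases (pvOp1 q0).2.2.2 <;> simp
      rcases (pvOp1_good q0).2.2.2.1 this with h' | h'
      · simp [hq0] at h'
      · have m2 := (pvOp2_good (pvOp1 q0)).2.2.1
        have m3 := (pvOp3_good (pvOp2 (pvOp1 q0))).2.2.1
        have m4 := (pvOp4_good (pvOp3 (pvOp2 (pvOp1 q0)))).2.2.1
        have m5 := (pvOp5_good (pvOp4 (pvOp3 (pvOp2 (pvOp1 q0))))).2.2.1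
        have m6 := (pvOp6_good (pvOp5 (pvOp4 (pvOp3 (pvOp2 (pvOp1 q0)))))).2.2.1
        rw [hout] at m6
        omega
    exact (pvOp1_good q0).2.2.2.2 hc
  have f2 : pvOp2 q0 = q0 := by
    rw [f1] at hout
    have hc : (pvOp2 q0).2.2.2 = false := by
      by_contra hcc
      have : (pvOp2 q0).2.2.2 = true := by revert hcc; cases (pvOp2 q0).2.2.2 <;> simp
      rcases (pvOp2_good q0).2.2.2.1 this with h' | h'
      · simp [hq0] at h'
      · have m3 := (pvOp3_good (pvOp2 q0)).2.2.1
        have m4 := (pvOp4_good (pvOp3 (pvOp2 q0))).2.2.1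
        have m5 := (pvOp5_good (pvOp4 (pvOp3 (pvOp2 q0)))).2.2.1
        have m6 := (pvOp6_good (pvOp5 (pvOp4 (pvOp3 (pvOp2 q0))))).2.2.1
        rw [hout] at m6
        omega
    exact (pvOp2_good q0).2.2.2.2 hc
  have f3 : pvOp3 q0 = q0 := by
    rw [f1, f2] at hout
    have hc : (pvOp3 q0).2.2.2 = false := by
      by_contra hcc
      have : (pvOp3 q0).2.2.2 = true := by revert hcc; cases (pvOp3 q0).2.2.2 <;> simp
      rcases (pvOp3_good q0).2.2.2.1 this with h' | h'
      · simp [hq0] at h'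
      · have m4 := (pvOp4_good (pvOp3 q0)).2.2.1
        have m5 := (pvOp5_good (pvOp4 (pvOp3 q0))).2.2.1
        have m6 := (pvOp6_good (pvOp5 (pvOp4 (pvOp3 q0)))).2.2.1
        rw [hout] at m6
        omega
    exact (pvOp3_good q0).2.2.2.2 hc
  have f4 : pvOp4 q0 = q0 := by
    rw [f1, f2, f3] at hout
    have hc : (pvOp4 q0).2.2.2 = false := by
      by_contra hcc
      have : (pvOp4 q0).2.2.2 = true := by revert hcc; cases (pvOp4 q0).2.2.2 <;> simp
      rcases (pvOp4_good q0).2.2.2.1 this with h' | h'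
      · simp [hq0] at h'
      · have m5 := (pvOp5_good (pvOp4 q0)).2.2.1
        have m6 := (pvOp6_good (pvOp5 (pvOp4 q0))).2.2.1
        rw [hout] at m6
        omega
    exact (pvOp4_good q0).2.2.2.2 hc
  obtain ⟨g1, g2⟩ := pvOp1_fix f1
  obtain ⟨g3, g4⟩ := pvOp2_fix f2
  have g5 := pvOp3_fix f3
  have g6 := pvOp4_fix f4
  unfold pvCanon
  dsimp only
  have hm : max (min (n + ne) (ne + se)) (min (max (n + ne) (ne + se)) 0) = ne := by omega
  rw [hm]
  simp only [Prod.mk.injEq]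
  exact ⟨by omega, trivial, by omega⟩

theorem pvLoopAux_eq (fuel : Nat) (s : Int × Int × Int) (hf : pvMu3 s < fuel) :
    pvLoopAux fuel s = (pvCanon s, decide (pvCanon s ≠ s)) ∧ pvMu3 (pvCanon s) ≤ pvMu3 s := by
  induction fuel generalizing s with
  | zero => omega
  | succ fuel ih =>
    have hstep : pvLoopAux (fuel + 1) s =
        (match pvStepA s with
          | (s', true) => ((pvLoopAux fuel s').1, true)
          | (s', false) => (s', false)) := rfl
    rw [hstep]
    split
    · next s' h =>
      obtain ⟨h1, h2, h3, h4, _⟩ := pvStepA_spec s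
      rw [h] at h1 h2 h3 h4
      have hdec : pvMu3 s' < pvMu3 s := h4 rfl
      obtain ⟨ihe, ihm⟩ := ih s' (by omega)
      have hcc : pvCanon s' = pvCanon s := pvCanon_congr h1 h2
      rw [hcc] at ihe ihm
      have hne : pvCanon s ≠ s := by
        intro he
        have : pvMu3 (pvCanon s) < pvMu3 s := lt_of_le_of_lt ihm hdec
        rw [he] at this
        omega
      rw [ihe]
      exact ⟨by simp [hne], by omega⟩
    · next s' h =>
      obtain ⟨_, _, _, _, h5⟩ := pvStepA_spec s
      rw [h] at h5
      have hs : s' = s := h5 rfl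
      subst hs
      have hfix : pvCanon s' = s' := pvStepA_fix h
      rw [hfix]
      exact ⟨by simp, le_refl _⟩

theorem pvLoopA_eq (s : Int × Int × Int) :
    pvLoopA s = (pvCanon s, decide (pvCanon s ≠ s)) :=
  (pvLoopAux_eq (pvMu3 s + 1) s (Nat.lt_succ_self _)).1

-- ===== VERDICT (by name: the statement is the Claim_ definition above) =====
theorem reduce_moves_spec : Claim_equal_reduce_moves := by
  intro ms _ _
  unfold Spec_reduce_moves reduce_moves reduce_moves_alt
  dsimp only
  rw [pvLoopA_eq]
  simp only [pvCanon]
  rfl
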